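-- pv_equiv track=rewrite | github.com/zplchn/m_amzn | string_1.py | compress443
-- ===== SOURCE A (Python) =====
-- from typing import List, Optional
--
-- def compress443(chars: List[str]) -> int:
--     if not chars:
--         return 0
--     i = j = w = 0
--     while i < len(chars):
--         while j < len(chars) and chars[j] == chars[i]:
--             j += 1
--         chars[w] = chars[i]
--         w += 1
--         if j > i + 1:
--             n = str(j - i)
--             chars[w:w + len(n)] = list(n)  # str cannod do assignment. only list can
--             w += len(n)
--         i = j
--     return w
-- ===== SOURCE B (Python) =====
-- def compress443(chars):
--     runs = []
--     for c in chars: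
--         if runs and runs[-1][0] == c:
--             runs[-1][1] += 1
--         else:
--             runs.append([c, 1])
--     out = []
--     for c, k in runs:
--         out.append(c)
--         if k > 1:
--             out.extend(str(k))
--     chars[:len(out)] = out
--     return len(out)
-- ===== Notes on version B (the rewrite author's own statement) =====
-- stated objective: faster
-- what changed: Replaces A's interleaved three-pointer (i/j/w) scan-and-splice loop by a two-phase pipeline: one grouping pass building (char, run-length) pairs, then a flat output list built from the runs and written back with a single slice assignment; the return value is the output length.
import Mathlib
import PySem

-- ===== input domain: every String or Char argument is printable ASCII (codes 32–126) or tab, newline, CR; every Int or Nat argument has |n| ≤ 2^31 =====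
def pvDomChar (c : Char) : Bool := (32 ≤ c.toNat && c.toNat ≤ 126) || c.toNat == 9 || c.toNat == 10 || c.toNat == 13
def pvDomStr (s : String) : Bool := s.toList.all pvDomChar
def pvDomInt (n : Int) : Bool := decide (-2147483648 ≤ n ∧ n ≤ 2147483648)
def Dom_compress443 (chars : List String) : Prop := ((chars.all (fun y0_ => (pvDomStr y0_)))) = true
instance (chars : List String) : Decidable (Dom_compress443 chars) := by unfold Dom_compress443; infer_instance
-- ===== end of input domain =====

-- B replaces A's interleaved three-pointer scan-and-splice by a grouping pass (runs) plus a flat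
-- rebuild; both mutate `chars` in place identically on its first `result` positions — the proved
-- equivalence is about the RETURN value (the compressed length).

-- ===== PORT A =====
-- inner `while j < len(chars) and chars[j] == chars[i]`; fuel = chars.length - j at each call
def innerA (fuel : Nat) (chars : List String) (i j : Nat) : Nat :=
  match fuel with
  | 0 => j
  | fuel + 1 =>
    if j < chars.length ∧ chars.getD j "" = chars.getD i "" then
      innerA fuel chars i (j + 1)
    else j

-- outer `while i < len(chars)`: writes chars[w]=chars[i], splices the digits of str(j-i) when j>i+1
def outerA (fuel : Nat) (chars : List String) (i j w : Nat) : Int :=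
  match fuel with
  | 0 => (w : Int)
  | fuel + 1 =>
    if i < chars.length then
      let j' := innerA (chars.length - j) chars i j
      let chars1 := chars.set w (chars.getD i "")
      if j' > i + 1 then
        let n := PySem.Int.toChars ((j' : Int) - (i : Int))
        -- chars[w:w+len(n)] = list(n)  (slice assignment, after w += 1)
        let chars2 := chars1.take (w + 1) ++ n.map (fun c => String.ofList [c]) ++
                      chars1.drop (w + 1 + n.length)
        outerA fuel chars2 j' j' (w + 1 + n.length)
      else
        outerA fuel chars1 j' j' (w + 1)
    else (w : Int)

def compress443 (chars : List String) : Int :=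
  if chars.isEmpty then 0 else outerA (chars.length + 1) chars 0 0 0

-- ===== PORT B =====
-- grouping pass: `if runs and runs[-1][0] == c: runs[-1][1] += 1 else: runs.append([c, 1])`
def runStepB (rs : List (String × Int)) (c : String) : List (String × Int) :=
  match rs.getLast? with
  | some (c0, k) => if c0 = c then rs.dropLast ++ [(c0, k + 1)] else rs ++ [(c, 1)]
  | none => [(c, 1)]

-- output pass: `out.append(c); if k > 1: out.extend(str(k))`
def outStepB (out : List String) (ck : String × Int) : List String :=
  (out ++ [ck.1]) ++
    (if ck.2 > 1 then (PySem.Int.toChars ck.2).map (fun c => String.ofList [c]) else [])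

def compress443_alt (chars : List String) : Int :=
  let runs := chars.foldl runStepB []
  let out := runs.foldl outStepB []
  (out.length : Int)

-- ===== PRECONDITION & SPEC =====
def Spec_compress443 (chars : List String) (out : Int) : Prop := out = compress443_alt chars
instance (chars : List String) (out : Int) : Decidable (Spec_compress443 chars out) := by unfold Spec_compress443; infer_instance

-- ===== CLAIM (what is proved, stated in full; the proofs are below) =====
def Claim_equal_compress443 : Prop := ∀ (chars : List String), Dom_compress443 chars → Spec_compress443 chars (compress443 chars)

-- ===== LEMMAS AND PROOFS =====

-- length of the maximal run of `c` at the head of the list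
def runLen (c : String) : List String → Nat
  | [] => 0
  | d :: rest => if c = d then runLen c rest + 1 else 0

-- the run decomposition both programs compute
def specRuns : List String → List (String × Nat)
  | [] => []
  | c :: rest => (c, runLen c rest + 1) :: specRuns (rest.drop (runLen c rest))
  termination_by cs => cs.length
  decreasing_by simp only [List.length_drop, List.length_cons]; omega

def costI (r : String × Nat) : Int :=
  1 + (if 1 < r.2 then ((PySem.Int.toChars ((r.2 : Int))).length : Int) else 0)

def specTotal (cs : List String) : Int := ((specRuns cs).map costI).sum

theorem runLen_le (c : String) (l : List String) : runLen c l ≤ l.length := by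
  induction l with
  | nil => simp [runLen]
  | cons d rest ih => simp only [runLen]; split <;> simp; omega

theorem innerA_eq (fuel : Nat) (chars : List String) (i : Nat) :
    ∀ j, chars.length - j ≤ fuel →
      innerA fuel chars i j = j + runLen (chars.getD i "") (chars.drop j) := by
  induction fuel with
  | zero =>
    intro j hj
    have : chars.drop j = [] := List.drop_eq_nil_of_le (by omega)
    simp [innerA, this, runLen]
  | succ fuel ih =>
    intro j hj
    by_cases hjl : j < chars.length
    · have hdrop : chars.drop j = chars[j] :: chars.drop (j + 1) := List.drop_eq_getElem_cons hjl
      have hgd : chars.getD j "" = chars[j] := List.getD_eq_getElem chars "" hjl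
      by_cases heq : chars[j] = chars.getD i ""
      · rw [innerA, if_pos ⟨hjl, by rw [hgd]; exact heq⟩, ih (j+1) (by omega), hdrop]
        simp only [runLen, if_pos heq.symm]
        omega
      · rw [innerA, if_neg (by rw [hgd]; tauto), hdrop]
        have hne : ¬ (chars.getD i "" = chars[j]) := fun h => heq h.symm
        simp only [runLen, if_neg hne, Nat.add_zero]
    · rw [innerA, if_neg (by tauto)]
      have : chars.drop j = [] := List.drop_eq_nil_of_le (by omega)
      simp [this, runLen]

theorem digits_le (k : Nat) (h : 2 ≤ k) : (Nat.toDigits 10 k).length ≤ k - 1 := by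
  rw [Nat.length_toDigits_le_iff (by omega) (by omega)]
  have h1 : k - 1 < 2 ^ (k - 1) := Nat.lt_two_pow_self
  have h2 : 2 ^ (k - 1) < 10 ^ (k - 1) := Nat.pow_lt_pow_left (by omega) (by omega)
  omega

theorem runStepB_ne_nil (rs : List (String × Int)) (c : String) : runStepB rs c ≠ [] := by
  unfold runStepB
  cases h : rs.getLast? with
  | none => simp
  | some p => cases p; dsimp; split <;> simp

theorem runStepB_prefix (a b : List (String × Int)) (c : String) (hb : b ≠ []) :
    runStepB (a ++ b) c = a ++ runStepB b c := by
  unfold runStepB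
  rw [List.getLast?_append_of_ne_nil a hb]
  cases h : b.getLast? with
  | none => exact absurd (List.getLast?_eq_none_iff.mp h) hb
  | some p =>
    cases p with
    | mk c0 k =>
      dsimp
      split
      · rw [List.dropLast_append_of_ne_nil hb, List.append_assoc]
      · rw [List.append_assoc]

theorem foldlB_prefix (cs : List String) : ∀ (a b : List (String × Int)), b ≠ [] →
    cs.foldl runStepB (a ++ b) = a ++ cs.foldl runStepB b := by
  induction cs with
  | nil => intro a b _; simp
  | cons c rest ih =>
    intro a b hb
    simp only [List.foldl_cons]
    rw [runStepB_prefix a b c hb, ih a _ (runStepB_ne_nil b c)]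

def castRun (r : String × Nat) : String × Int := (r.1, (r.2 : Int))

theorem foldlB_single (cs : List String) : ∀ (c : String) (k : Int),
    cs.foldl runStepB [(c, k)] =
      (c, k + (runLen c cs : Int)) :: (specRuns (cs.drop (runLen c cs))).map castRun := by
  induction cs with
  | nil => intro c k; simp [runLen, specRuns]
  | cons d rest ih =>
    intro c k
    simp only [List.foldl_cons]
    have hstep : runStepB [(c, k)] d =
        if c = d then [(c, k + 1)] else [(c, k), (d, 1)] := by
      unfold runStepB; simp
    by_cases hcd : c = d
    · rw [hstep, if_pos hcd, ih c (k + 1)]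
      subst hcd
      simp only [runLen]
      congr 2
      push_cast
      ring
    · rw [hstep, if_neg hcd]
      rw [show [(c, k), (d, (1:Int))] = [(c, k)] ++ [(d, 1)] from rfl]
      rw [foldlB_prefix rest [(c, k)] [(d, 1)] (by simp), ih d 1]
      simp only [runLen, if_neg hcd, List.drop_zero, specRuns]
      simp only [List.map_cons, castRun, List.singleton_append]
      congr 3
      all_goals push_cast
      all_goals ring

theorem outLen (rs : List (String × Int)) : ∀ out : List String,
    (((rs.foldl outStepB out).length : Nat) : Int) = (out.length : Int) +
      (rs.map (fun r => 1 + if r.2 > 1 then ((PySem.Int.toChars r.2).length : Int) else 0)).sum := by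
  induction rs with
  | nil => intro out; simp
  | cons r rest ih =>
    intro out
    simp only [List.foldl_cons, List.map_cons, List.sum_cons]
    rw [ih]
    have hlen : (outStepB out r).length =
        out.length + 1 + (if r.2 > 1 then (PySem.Int.toChars r.2).length else 0) := by
      unfold outStepB; split <;> (simp; try omega)
    rw [hlen]
    split_ifs <;> push_cast <;> ring

theorem runsB_eq (chars : List String) :
    chars.foldl runStepB [] = (specRuns chars).map castRun := by
  cases chars with
  | nil => simp [specRuns]
  | cons c rest =>
    simp only [List.foldl_cons]
    have h0 : runStepB [] c = [(c, 1)] := by unfold runStepB; simp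
    rw [h0, foldlB_single rest c 1, specRuns]
    simp only [List.map_cons, castRun]
    congr 2
    · push_cast; ring

theorem altB_eq (chars : List String) : compress443_alt chars = specTotal chars := by
  unfold compress443_alt specTotal
  rw [runsB_eq, outLen]
  simp only [List.length_nil, Nat.cast_zero, zero_add, List.map_map]
  refine congrArg List.sum ?_
  apply List.map_congr_left
  intro r _
  simp only [Function.comp, castRun, costI, gt_iff_lt, Nat.one_lt_cast]

theorem drop_concat3 (a b c : List String) (j : Nat) (ha : a.length ≤ j)
    (hb : a.length + b.length ≤ j) :
    (a ++ b ++ c).drop j = c.drop (j - a.length - b.length) := by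
  rw [List.append_assoc]
  rw [show j = a.length + (j - a.length) by omega, List.drop_length_add_append]
  rw [show j - a.length = b.length + (j - a.length - b.length) by omega,
    List.drop_length_add_append]
  congr 1
  omega

theorem outerA_eq : ∀ (fuel : Nat) (chars : List String) (i w : Nat), w ≤ i →
    i ≤ chars.length → chars.length - i < fuel →
    outerA fuel chars i i w = (w : Int) + specTotal (chars.drop i) := by
  intro fuel
  induction fuel with
  | zero => intro chars i w _ _ h; exact absurd h (Nat.not_lt_zero _)
  | succ fuel ih =>
    intro chars i w hwi hil hfuel
    by_cases hi : i < chars.length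
    · have hgd : chars.getD i "" = chars[i] := List.getD_eq_getElem chars "" hi
      have hdropi : chars.drop i = chars[i] :: chars.drop (i + 1) :=
        List.drop_eq_getElem_cons hi
      have hinner : innerA (chars.length - i) chars i i =
          i + (runLen chars[i] (chars.drop (i + 1)) + 1) := by
        rw [innerA_eq _ chars i i (le_refl _), hgd, hdropi]
        simp [runLen]
      set m := runLen chars[i] (chars.drop (i + 1)) with hm
      have hmle : m ≤ chars.length - (i + 1) := by
        have h1 := runLen_le chars[i] (chars.drop (i + 1))
        rw [List.length_drop] at h1
        omega
      have hspec : specTotal (chars.drop i) =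
          costI (chars[i], m + 1) + specTotal (chars.drop (i + 1 + m)) := by
        rw [hdropi]
        unfold specTotal
        rw [specRuns]
        simp only [List.map_cons, List.sum_cons, ← hm, List.drop_drop]
      rw [outerA]
      simp only [if_pos hi, hinner, hgd]
      by_cases hm0 : m = 0
      · rw [if_neg (by omega)]
        rw [hm0] at hspec ⊢
        simp only [Nat.zero_add, Nat.add_zero] at hspec ⊢
        rw [ih (chars.set w chars[i]) (i + 1) (w + 1) (by omega)
          (by rw [List.length_set]; omega) (by rw [List.length_set]; omega)]
        rw [List.drop_set_of_lt (by omega : w < i + 1)]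
        rw [hspec]
        have hc : costI (chars[i], 1) = 1 := by simp [costI]
        rw [hc]
        push_cast
        ring
      · rw [if_pos (by omega)]
        have hcast : ((i + (m + 1) : Nat) : Int) - ((i : Nat) : Int) = ((m + 1 : Nat) : Int) := by
          push_cast; ring
        rw [hcast]
        have hn : PySem.Int.toChars ((m + 1 : Nat) : Int) = Nat.toDigits 10 (m + 1) := by
          simp [PySem.Int.toChars]
          omega
        rw [hn]
        set nl := (Nat.toDigits 10 (m + 1)).length with hnl
        have hnlm : nl ≤ m := by
          have := digits_le (m + 1) (by omega)
          omega
        set chars1 := chars.set w chars[i] with hc1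
        have hlen1 : chars1.length = chars.length := by rw [hc1, List.length_set]
        set dg := (Nat.toDigits 10 (m + 1)).map (fun c => String.ofList [c]) with hdg
        have hdgl : dg.length = nl := by rw [hdg, List.length_map]
        set chars2 := chars1.take (w + 1) ++ dg ++ chars1.drop (w + 1 + nl) with hc2
        have htl : (chars1.take (w + 1)).length = w + 1 := by
          rw [List.length_take]; omega
        have hlen2 : chars2.length = chars.length := by
          rw [hc2]
          simp only [List.length_append, htl, hdgl, List.length_drop, hlen1]
          omega
        have hdrop2 : chars2.drop (i + (m + 1)) = chars.drop (i + 1 + m) := by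
          rw [hc2, drop_concat3 _ _ _ _ (by omega) (by rw [htl, hdgl]; omega)]
          rw [htl, hdgl, List.drop_drop]
          rw [show w + 1 + nl + (i + (m + 1) - (w + 1) - nl) = i + 1 + m by omega]
          rw [hc1, List.drop_set_of_lt (by omega : w < i + 1 + m)]
        have hrec := ih chars2 (i + (m + 1)) (w + 1 + nl) (by omega)
          (by rw [hlen2]; omega) (by rw [hlen2]; omega)
        rw [hrec, hdrop2, hspec]
        have hc : costI (chars[i], m + 1) = 1 + (nl : Int) := by
          have h1 : (1 : Nat) < m + 1 := by omega
          simp only [costI, if_pos h1, hn, hnl]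
        rw [hc]
        push_cast
        ring
    · have hie : i = chars.length := by omega
      rw [outerA, if_neg hi, hie, List.drop_length]
      simp [specTotal, specRuns]

-- ===== VERDICT (by name: the statement is the Claim_ definition above) =====
theorem compress443_spec : Claim_equal_compress443 := by
  intro chars _
  unfold Spec_compress443
  rw [altB_eq]
  unfold compress443
  by_cases h : chars.isEmpty
  · rw [if_pos h]
    rw [List.isEmpty_iff.mp h]
    simp [specTotal, specRuns]
  · rw [if_neg h, outerA_eq (chars.length + 1) chars 0 0 (le_refl 0) (by omega) (by omega)]
    simp
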